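-- pv_equiv track=rewrite | github.com/roddavinod99/weather-tweet-bot | weatherappbot.py | create_full_tweet_text
-- ===== SOURCE A (Python) =====
-- TWITTER_MAX_CHARS = 280
--
-- def create_full_tweet_text(tweet_lines, hashtags):
--     """Combines tweet lines and hashtags into the final text."""
--     body = "\n".join(tweet_lines)
--     while hashtags:
--         hashtag_str = " ".join(hashtags)
--         full_tweet = f"{body}\n{hashtag_str}"
--         if len(full_tweet) <= TWITTER_MAX_CHARS:
--             return full_tweet
--         hashtags.pop()
--     return body
-- ===== SOURCE B (Python) =====
-- TWITTER_MAX_CHARS = 280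
--
-- def create_full_tweet_text(tweet_lines, hashtags):
--     """Combines tweet lines and hashtags into the final text (single pass over hashtags)."""
--     body = "\n".join(tweet_lines)
--     budget = TWITTER_MAX_CHARS - len(body) - 1
--     total = 0
--     best = 0
--     for i, h in enumerate(hashtags):
--         total += len(h) + (1 if i else 0)
--         if total <= budget:
--             best = i + 1
--     del hashtags[best:]  # same in-place truncation A performs via pop()
--     if best:
--         return body + "\n" + " ".join(hashtags)
--     return body
-- ===== Notes on version B (the rewrite author's own statement) =====
-- stated objective: faster
-- what changed: A rebuilds the full joined tweet and re-measures it after each pop (quadratic in the hashtag text); B accumulates the joined hashtag length in one pass over the list, picks the largest fitting prefix, and builds the string once.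
import Mathlib
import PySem

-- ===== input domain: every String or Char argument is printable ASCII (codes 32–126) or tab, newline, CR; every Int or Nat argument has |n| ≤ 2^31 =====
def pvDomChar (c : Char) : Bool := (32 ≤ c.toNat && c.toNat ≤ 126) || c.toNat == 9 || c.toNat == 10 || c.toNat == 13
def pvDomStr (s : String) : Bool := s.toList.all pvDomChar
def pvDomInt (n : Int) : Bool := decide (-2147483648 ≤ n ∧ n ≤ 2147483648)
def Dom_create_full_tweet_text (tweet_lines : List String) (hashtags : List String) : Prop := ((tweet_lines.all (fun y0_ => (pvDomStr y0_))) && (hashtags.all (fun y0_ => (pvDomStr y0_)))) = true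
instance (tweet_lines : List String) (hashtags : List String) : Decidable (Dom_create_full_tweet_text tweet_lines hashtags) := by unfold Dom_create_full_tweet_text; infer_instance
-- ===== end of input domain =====

-- B replaces A's repeated " ".join / pop loop (quadratic) by one pass over the hashtags that
-- accumulates the joined length and remembers the largest fitting prefix (objective: faster).
-- Both A and B truncate the `hashtags` list in place identically; the theorem is about the return value.


-- ===== PORT A =====
-- the `while hashtags: … hashtags.pop()` loop of A, step for step
def pvLoopA (body : String) (hashtags : List String) : String :=
  if _h : hashtags = [] then body
  else
    let hashtag_str := PySem.Str.join " " hashtags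
    let full_tweet := body ++ "\n" ++ hashtag_str
    if PySem.Str.len full_tweet ≤ 280 then full_tweet
    else pvLoopA body hashtags.dropLast
termination_by hashtags.length
decreasing_by
  have h2 : hashtags.length ≠ 0 := by simpa [List.length_eq_zero_iff] using _h
  simp only [List.length_dropLast]
  omega

def create_full_tweet_text (tweet_lines : List String) (hashtags : List String) : String :=
  let body := PySem.Str.join "\n" tweet_lines
  pvLoopA body hashtags

-- ===== PORT B =====
def create_full_tweet_text_alt (tweet_lines : List String) (hashtags : List String) : String :=
  let body := PySem.Str.join "\n" tweet_lines
  let budget : Int := 280 - PySem.Str.len body - 1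
  -- for i, h in enumerate(hashtags): total += len(h) + (1 if i else 0); if total <= budget: best = i+1
  let st := (PySem.List.enumerate hashtags 0).foldl
    (fun (p : Int × Int) ih =>
      let total := p.1 + PySem.Str.len ih.2 + (if ih.1 == 0 then 0 else 1)
      (total, if total ≤ budget then ih.1 + 1 else p.2)) (0, 0)
  let best := st.2
  if best ≠ 0 then body ++ "\n" ++ PySem.Str.join " " (hashtags.take best.toNat)
  else body

-- ===== PRECONDITION & SPEC =====
def Spec_create_full_tweet_text (tweet_lines : List String) (hashtags : List String) (out : String) : Prop := out = create_full_tweet_text_alt tweet_lines hashtags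
instance (tweet_lines : List String) (hashtags : List String) (out : String) : Decidable (Spec_create_full_tweet_text tweet_lines hashtags out) := by unfold Spec_create_full_tweet_text; infer_instance

-- ===== CLAIM (what is proved, stated in full; the proofs are below) =====
def Claim_equal_create_full_tweet_text : Prop := ∀ (tweet_lines : List String) (hashtags : List String), Dom_create_full_tweet_text tweet_lines hashtags → Spec_create_full_tweet_text tweet_lines hashtags (create_full_tweet_text tweet_lines hashtags)

-- ===== LEMMAS AND PROOFS =====

-- length of " ".join l, in characters
def flen : List String → Nat
  | [] => 0
  | [x] => x.length
  | x :: y :: r => x.length + 1 + flen (y :: r)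

theorem flen_cons (a : String) (m : List String) (h : m ≠ []) :
    flen (a :: m) = a.length + 1 + flen m := by
  cases m with
  | nil => exact absurd rfl h
  | cons b r => rfl

theorem flen_join (l : List String) : (PySem.Str.join " " l).length = flen l := by
  induction l with
  | nil => decide
  | cons a m ih =>
    cases m with
    | nil => simp [flen, PySem.Str.join, PySem.Chars.join_singleton]
    | cons b r =>
      rw [flen_cons a (b :: r) (by simp), ← ih]
      have hj : (PySem.Str.join " " (a :: b :: r)).toList
          = a.toList ++ ' ' :: (PySem.Chars.join [' '] (b.toList :: r.map String.toList)) := by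
        simp [PySem.Str.toList_join]
        simpa using PySem.Chars.join_cons_cons [' '] a.toList b.toList (r.map String.toList)
      have h1 : (PySem.Str.join " " (b :: r)).toList
          = PySem.Chars.join [' '] (b.toList :: r.map String.toList) := by
        simp [PySem.Str.toList_join]
      simp only [String.length, hj, h1]
      simp
      omega

theorem flen_snoc (l : List String) (x : String) :
    flen (l ++ [x]) = if l = [] then x.length else flen l + 1 + x.length := by
  induction l with
  | nil => simp [flen]
  | cons a t ih =>
    have h1 : (a :: t) ++ [x] = a :: (t ++ [x]) := rfl
    rw [h1, flen_cons a (t ++ [x]) (by simp)]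
    cases t with
    | nil => simp [flen]
    | cons b r =>
      rw [ih]
      simp only [List.cons_ne_nil, reduceIte]
      rw [flen_cons a (b :: r) (by simp)]
      omega

-- the index A's pop-loop stops at: the largest k ≥ 1 such that the first k hashtags fit, else 0
def bk (B : Nat) (l : List String) : Nat :=
  if _h : l = [] then 0
  else if B + 1 + flen l ≤ 280 then l.length
  else bk B l.dropLast
termination_by l.length
decreasing_by
  have h2 : l.length ≠ 0 := by simpa [List.length_eq_zero_iff] using _h
  simp only [List.length_dropLast]
  omega

theorem bk_nil (B : Nat) : bk B [] = 0 := by rw [bk.eq_def]; simp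

theorem bk_snoc (B : Nat) (l : List String) (x : String) :
    bk B (l ++ [x]) = if B + 1 + flen (l ++ [x]) ≤ 280 then l.length + 1 else bk B l := by
  rw [bk.eq_def]
  simp

theorem bk_le (B : Nat) (l : List String) : bk B l ≤ l.length := by
  induction l using List.reverseRecOn with
  | nil => simp [bk_nil]
  | append_singleton l x ih =>
    rw [bk_snoc]
    split_ifs with h
    · simp
    · simp only [List.length_append, List.length_cons, List.length_nil]
      omega

theorem take_dropLast_eq {α : Type} (l : List α) (k : Nat) (hk : k ≤ l.dropLast.length) :
    l.dropLast.take k = l.take k := by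
  rw [List.dropLast_eq_take, List.take_take]
  congr 1
  simp only [List.length_dropLast] at hk
  omega

theorem loopA_aux (body : String) (n : Nat) : ∀ l : List String, l.length ≤ n →
    pvLoopA body l =
      if bk body.length l = 0 then body
      else body ++ "\n" ++ PySem.Str.join " " (l.take (bk body.length l)) := by
  induction n with
  | zero =>
    intro l hl
    have h0 : l = [] := by
      cases l with
      | nil => rfl
      | cons a t => simp at hl
    subst h0
    rw [pvLoopA.eq_def, bk_nil]
    simp
  | succ n ih =>
    intro l hl
    by_cases h : l = []
    · subst h
      rw [pvLoopA.eq_def, bk_nil]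
      simp
    · have hlen : (PySem.Str.len (body ++ "\n" ++ PySem.Str.join " " l))
          = ((body.length + 1 + flen l : Nat) : Int) := by
        simp [PySem.Str.len_eq, ← String.length_toList, ← flen_join]
        omega
      by_cases hfit : body.length + 1 + flen l ≤ 280
      · have hfit' : PySem.Str.len (body ++ "\n" ++ PySem.Str.join " " l) ≤ 280 := by
          rw [hlen]; exact_mod_cast hfit
        rw [pvLoopA.eq_def, bk.eq_def]
        simp only [dif_neg h, if_pos hfit', if_pos hfit]
        have hne : l.length ≠ 0 := by simpa [List.length_eq_zero_iff] using h
        rw [if_neg hne, List.take_length]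
      · have hfit' : ¬ PySem.Str.len (body ++ "\n" ++ PySem.Str.join " " l) ≤ 280 := by
          rw [hlen]
          intro hc
          exact hfit (by exact_mod_cast hc)
        rw [pvLoopA.eq_def, bk.eq_def]
        simp only [dif_neg h, if_neg hfit', if_neg hfit]
        have hl' : l.dropLast.length ≤ n := by
          have hne : l.length ≠ 0 := by simpa [List.length_eq_zero_iff] using h
          simp only [List.length_dropLast]
          omega
        rw [ih l.dropLast hl', take_dropLast_eq l _ (bk_le _ _)]

theorem enumerate_snoc {α : Type} (l : List α) (x : α) (s : Int) :
    PySem.List.enumerate (l ++ [x]) s = PySem.List.enumerate l s ++ [((s + l.length : Int), x)] := by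
  induction l generalizing s with
  | nil => simp [PySem.List.enumerate_nil, PySem.List.enumerate_cons]
  | cons a t ih =>
    simp only [List.cons_append, PySem.List.enumerate_cons, ih (s + 1), List.length_cons]
    congr 3
    simp only [Prod.mk.injEq, and_true]
    push_cast
    omega

theorem foldB_eq (budget : Int) (B : Nat) (hbudget : budget = 280 - (B : Int) - 1) (l : List String) :
    (PySem.List.enumerate l 0).foldl
      (fun (p : Int × Int) ih =>
        (p.1 + PySem.Str.len ih.2 + (if ih.1 == 0 then 0 else 1),
         if (p.1 + PySem.Str.len ih.2 + (if ih.1 == 0 then 0 else 1)) ≤ budget then ih.1 + 1 else p.2))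
      (0, 0)
    = ((flen l : Int), (bk B l : Int)) := by
  induction l using List.reverseRecOn with
  | nil => simp [PySem.List.enumerate_nil, flen, bk_nil]
  | append_singleton l x ih =>
    rw [enumerate_snoc, List.foldl_append, ih]
    simp only [List.foldl_cons, List.foldl_nil, PySem.Str.len_eq]
    have hxl : (x.toList.length : Int) = (x.length : Int) := by
      simp
    have htot : (flen l : Int) + (x.toList.length : Int) + (if ((0 : Int) + l.length == 0) then 0 else 1)
        = (flen (l ++ [x]) : Int) := by
      rw [flen_snoc, hxl]
      by_cases hl : l = []
      · subst hl; simp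
      · have hne : l.length ≠ 0 := by simpa [List.length_eq_zero_iff] using hl
        rw [if_neg hl]
        have hne' : ¬ ((0 : Int) + l.length == 0) = true := by
          simp
          omega
        rw [if_neg hne']
        push_cast
        ring
    rw [htot, bk_snoc]
    subst hbudget
    by_cases hfit : B + 1 + flen (l ++ [x]) ≤ 280
    · have hfit' : (flen (l ++ [x]) : Int) ≤ 280 - (B : Int) - 1 := by omega
      rw [if_pos hfit', if_pos hfit]
      simp only [Prod.mk.injEq, true_and]
      push_cast
      ring
    · have hfit' : ¬ (flen (l ++ [x]) : Int) ≤ 280 - (B : Int) - 1 := by omega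
      rw [if_neg hfit', if_neg hfit]

-- ===== VERDICT (by name: the statement is the Claim_ definition above) =====
theorem create_full_tweet_text_spec : Claim_equal_create_full_tweet_text := by
  intro tweet_lines hashtags _
  unfold Spec_create_full_tweet_text create_full_tweet_text create_full_tweet_text_alt
  simp only []
  rw [loopA_aux (PySem.Str.join "\n" tweet_lines) hashtags.length hashtags le_rfl,
      foldB_eq (280 - PySem.Str.len (PySem.Str.join "\n" tweet_lines) - 1)
        (PySem.Str.join "\n" tweet_lines).length
        (by simp [PySem.Str.len_eq, ← String.length_toList])]
  by_cases hz : bk (PySem.Str.join "\n" tweet_lines).length hashtags = 0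
  · simp [hz]
  · simp [hz]
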